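-- pv_equiv track=rewrite | github.com/Argonus/advent-of-code | advent_of_code_2023/day_06/solution.py | run_race
-- ===== SOURCE A (Python) =====
-- def run_race(race_time, race_record, rage_range):
--     acc = 0
--     for warmup_time in rage_range:
--         time_left = race_time - warmup_time
--         if time_left * warmup_time > race_record:
--             acc = warmup_time
--             break
--
--     return acc
-- ===== SOURCE B (Python) =====
-- def run_race(race_time, race_record, rage_range):
--     # completed-square form: w*(t-w) > rec  <=>  (2w - t)^2 < t^2 - 4*rec
--     d = race_time * race_time - 4 * race_record
--     acc = 0
--     for w in reversed(rage_range):
--         if (2 * w - race_time) ** 2 < d: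
--             acc = w
--     return acc
-- ===== Notes on version B (the rewrite author's own statement) =====
-- stated objective: alternative
-- what changed: B precomputes the discriminant once, replaces the per-element product test by the completed-square test (2w-t)^2 < t^2-4rec, and traverses the list back-to-front with an overwrite accumulator instead of scanning forward with a break.
import Mathlib
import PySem

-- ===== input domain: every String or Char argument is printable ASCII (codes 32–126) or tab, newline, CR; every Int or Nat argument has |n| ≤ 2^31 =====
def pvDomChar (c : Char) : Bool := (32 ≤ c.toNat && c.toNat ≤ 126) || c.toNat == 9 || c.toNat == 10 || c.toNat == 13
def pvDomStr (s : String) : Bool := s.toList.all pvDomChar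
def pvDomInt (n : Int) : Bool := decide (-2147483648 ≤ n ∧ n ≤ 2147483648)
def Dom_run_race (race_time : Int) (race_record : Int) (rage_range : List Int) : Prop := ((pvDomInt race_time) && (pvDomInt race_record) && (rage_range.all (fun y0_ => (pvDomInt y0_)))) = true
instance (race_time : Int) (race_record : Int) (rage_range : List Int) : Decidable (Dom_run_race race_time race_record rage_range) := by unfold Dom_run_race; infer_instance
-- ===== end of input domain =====

-- B precomputes the discriminant once, tests (2w-t)^2 < t^2-4rec instead of the product,
-- and scans the list back-to-front with an overwrite accumulator (objective: alternative).

-- ===== PORT A =====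
-- A's for-loop with break: first element w with (t - w) * w > rec; acc stays 0 if none
def runRaceLoopA (race_time race_record : Int) : List Int → Int
  | [] => 0
  | w :: ws => if (race_time - w) * w > race_record then w else runRaceLoopA race_time race_record ws

def run_race (race_time : Int) (race_record : Int) (rage_range : List Int) : Int :=
  runRaceLoopA race_time race_record rage_range

-- ===== PORT B =====
def run_race_alt (race_time : Int) (race_record : Int) (rage_range : List Int) : Int :=
  let d := race_time * race_time - 4 * race_record
  rage_range.reverse.foldl (fun acc w => if (2 * w - race_time) ^ 2 < d then w else acc) 0

-- ===== PRECONDITION & SPEC =====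
def Spec_run_race (race_time : Int) (race_record : Int) (rage_range : List Int) (out : Int) : Prop := out = run_race_alt race_time race_record rage_range
instance (race_time : Int) (race_record : Int) (rage_range : List Int) (out : Int) : Decidable (Spec_run_race race_time race_record rage_range out) := by unfold Spec_run_race; infer_instance

-- ===== CLAIM (what is proved, stated in full; the proofs are below) =====
def Claim_equal_run_race : Prop := ∀ (race_time : Int) (race_record : Int) (rage_range : List Int), Dom_run_race race_time race_record rage_range → Spec_run_race race_time race_record rage_range (run_race race_time race_record rage_range)

-- ===== LEMMAS AND PROOFS =====
-- the completed-square test equals A's product test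
theorem pred_iff (t r w : Int) : ((2 * w - t) ^ 2 < t * t - 4 * r) ↔ (t - w) * w > r := by
  constructor <;> intro h <;> nlinarith

theorem foldr_eq_loopA (t r : Int) (l : List Int) :
    l.foldr (fun w acc => if (2 * w - t) ^ 2 < t * t - 4 * r then w else acc) 0
      = runRaceLoopA t r l := by
  induction l with
  | nil => rfl
  | cons w ws ih =>
    simp only [List.foldr, runRaceLoopA, ih]
    by_cases h : (t - w) * w > r
    · rw [if_pos ((pred_iff t r w).mpr h), if_pos h]
    · rw [if_neg (fun hc => h ((pred_iff t r w).mp hc)), if_neg h]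

-- ===== VERDICT (by name: the statement is the Claim_ definition above) =====
theorem run_race_spec : Claim_equal_run_race := by
  intro t r l _
  unfold Spec_run_race run_race run_race_alt
  rw [List.foldl_reverse]
  exact (foldr_eq_loopA t r l).symm
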